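-- pv_equiv track=rewrite | github.com/grifaj/Rubiks_solver | test.py | check
-- ===== SOURCE A (Python) =====
-- def check(pieces, test):
--     for p in pieces:
--         there = False
--         for t in test:
--             if set(p) == set(t):
--                 there = True
--                 break
--         if not there:
--             return False
--     return True
-- ===== SOURCE B (Python) =====
-- def check(pieces, test):
--     def sig(xs):
--         return tuple(sorted(set(xs)))
--     return {sig(p) for p in pieces} <= {sig(t) for t in test}
-- ===== Notes on version B (the rewrite author's own statement) =====
-- stated objective: alternative
-- what changed: Replaces the nested scan-with-early-break by canonical signatures (sorted deduplicated tuples) collected into two sets and a single subset test; it trades the per-piece inner scan for building a signature index.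
import Mathlib
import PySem

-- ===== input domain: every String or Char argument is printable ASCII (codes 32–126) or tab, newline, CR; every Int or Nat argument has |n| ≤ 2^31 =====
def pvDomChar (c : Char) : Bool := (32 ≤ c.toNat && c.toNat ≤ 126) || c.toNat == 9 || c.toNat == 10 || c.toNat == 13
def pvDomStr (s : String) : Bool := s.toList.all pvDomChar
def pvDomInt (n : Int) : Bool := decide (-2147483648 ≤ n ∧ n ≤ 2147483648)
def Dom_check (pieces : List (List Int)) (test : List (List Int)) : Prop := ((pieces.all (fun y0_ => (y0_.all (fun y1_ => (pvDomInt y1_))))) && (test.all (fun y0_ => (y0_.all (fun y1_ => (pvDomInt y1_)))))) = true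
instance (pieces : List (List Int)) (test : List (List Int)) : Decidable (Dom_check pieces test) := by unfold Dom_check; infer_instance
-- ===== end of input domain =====

-- B replaces A's nested scan-with-early-break by canonical signatures (sorted deduplicated
-- tuples) collected into two sets and a single subset test (objective: alternative).

-- ===== PORT A =====
-- inner 'for t in test' loop: 'there' becomes true on the first t with set(p) == set(t)
def checkInner (p : List Int) : List (List Int) → Bool
  | [] => false
  | t :: rest =>
    if PySem.Set.equal (PySem.Set.ofList p) (PySem.Set.ofList t) then true
    else checkInner p rest

-- outer 'for p in pieces' loop with the early 'return False'
def checkLoop (test : List (List Int)) : List (List Int) → Bool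
  | [] => true
  | p :: rest =>
    let there := checkInner p test
    if !there then false else checkLoop test rest

def check (pieces : List (List Int)) (test : List (List Int)) : Bool :=
  checkLoop test pieces

-- ===== PORT B =====
-- sig(xs) = tuple(sorted(set(xs)))
def checkSig (xs : List Int) : List Int :=
  PySem.List.sorted (PySem.Set.ofList xs) (fun x => x) false

-- {sig(p) for p in pieces} <= {sig(t) for t in test}
def check_alt (pieces : List (List Int)) (test : List (List Int)) : Bool :=
  PySem.Set.issubset (PySem.Set.ofList (pieces.map checkSig))
                     (PySem.Set.ofList (test.map checkSig))

-- ===== PRECONDITION & SPEC =====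
def Spec_check (pieces : List (List Int)) (test : List (List Int)) (out : Bool) : Prop := out = check_alt pieces test
instance (pieces : List (List Int)) (test : List (List Int)) (out : Bool) : Decidable (Spec_check pieces test out) := by unfold Spec_check; infer_instance

-- ===== CLAIM (what is proved, stated in full; the proofs are below) =====
def Claim_equal_check : Prop := ∀ (pieces : List (List Int)) (test : List (List Int)), Dom_check pieces test → Spec_check pieces test (check pieces test)

-- ===== LEMMAS AND PROOFS =====

-- two lists have equal canonical signatures iff they have the same elements (Python set(p) == set(t))
theorem checkSig_eq_iff (p t : List Int) :
    checkSig p = checkSig t ↔ ∀ x : Int, x ∈ p ↔ x ∈ t := by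
  unfold checkSig
  rw [PySem.List.sorted_id_eq_sorted_id_iff_perm,
      List.perm_ext_iff_of_nodup (PySem.Set.nodup_ofList p) (PySem.Set.nodup_ofList t)]
  simp [PySem.Set.mem_ofList]

theorem checkInner_eq_true_iff (p : List Int) (test : List (List Int)) :
    checkInner p test = true ↔ ∃ t ∈ test, ∀ x : Int, x ∈ p ↔ x ∈ t := by
  induction test with
  | nil => simp [checkInner]
  | cons t rest ih =>
    simp only [checkInner]
    split_ifs with h
    · constructor
      · intro _
        refine ⟨t, List.mem_cons_self .., fun x => ?_⟩
        simpa [PySem.Set.mem_ofList] using (PySem.Set.equal_iff _ _).mp h x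
      · intro _; rfl
    · rw [ih]
      constructor
      · rintro ⟨u, hu, he⟩; exact ⟨u, List.mem_cons_of_mem _ hu, he⟩
      · rintro ⟨u, hu, he⟩
        rcases List.mem_cons.mp hu with rfl | hu'
        · exact absurd ((PySem.Set.equal_iff _ _).mpr
            (fun x => by simpa [PySem.Set.mem_ofList] using he x)) h
        · exact ⟨u, hu', he⟩

theorem checkLoop_eq_true_iff (test pieces : List (List Int)) :
    checkLoop test pieces = true ↔ ∀ p ∈ pieces, checkInner p test = true := by
  induction pieces with
  | nil => simp [checkLoop]
  | cons p rest ih =>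
    simp only [checkLoop]
    by_cases h : checkInner p test = true
    · simp [h, ih]
    · simp [Bool.not_eq_true] at h
      simp [h]

theorem check_alt_eq_true_iff (pieces test : List (List Int)) :
    check_alt pieces test = true ↔
      ∀ p ∈ pieces, ∃ t ∈ test, checkSig t = checkSig p := by
  unfold check_alt
  rw [PySem.Set.issubset_iff]
  constructor
  · intro h p hp
    have := h (checkSig p) (by rw [PySem.Set.mem_ofList]; exact List.mem_map_of_mem hp)
    rw [PySem.Set.mem_ofList, List.mem_map] at this
    obtain ⟨t, ht, hsig⟩ := this
    exact ⟨t, ht, hsig⟩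
  · intro h x hx
    rw [PySem.Set.mem_ofList, List.mem_map] at hx
    obtain ⟨p, hp, rfl⟩ := hx
    obtain ⟨t, ht, hsig⟩ := h p hp
    rw [PySem.Set.mem_ofList, List.mem_map]
    exact ⟨t, ht, hsig⟩

-- ===== VERDICT (by name: the statement is the Claim_ definition above) =====
theorem check_spec : Claim_equal_check := by
  intro pieces test _
  unfold Spec_check check
  rw [Bool.eq_iff_iff, checkLoop_eq_true_iff, check_alt_eq_true_iff]
  constructor
  · intro h p hp
    obtain ⟨t, ht, he⟩ := (checkInner_eq_true_iff p test).mp (h p hp)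
    exact ⟨t, ht, (checkSig_eq_iff t p).mpr (fun x => (he x).symm)⟩
  · intro h p hp
    obtain ⟨t, ht, hsig⟩ := h p hp
    exact (checkInner_eq_true_iff p test).mpr
      ⟨t, ht, fun x => ((checkSig_eq_iff t p).mp hsig x).symm⟩
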